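-- pv_equiv track=rewrite | github.com/Grunger/EGE | kpolyakov.spb.ru/23/5222.py | f
-- ===== SOURCE A (Python) =====
-- def f(n, e, s):
--     if n > e:
--         return 0
--     if n == e:
--         if s.count('2') + s.count('3') > s.count('1'):
--             return 1
--         return 0
--     return f(n + 3, e, s + '1') + f(n * 2, e, s + '2') + f(n * 7, e, s + '3')
-- ===== SOURCE B (Python) =====
-- def f(n, e, s):
--     memo = {}
--
--     def g(m, b):
--         if m > e:
--             return 0
--         if m == e:
--             return 1 if b > 0 else 0
--         if (m, b) in memo:
--             return memo[(m, b)]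
--         r = g(m + 3, b - 1) + g(m * 2, b + 1) + g(m * 7, b + 1)
--         memo[(m, b)] = r
--         return r
--
--     return g(n, s.count('2') + s.count('3') - s.count('1'))
-- ===== Notes on version B (the rewrite author's own statement) =====
-- stated objective: alternative
-- what changed: B replaces A's recursion over growing strings by a memoized recursion on the state (n, count('2')+count('3')-count('1')), caching each state's count in a dict so every state is solved once.
import Mathlib
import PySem

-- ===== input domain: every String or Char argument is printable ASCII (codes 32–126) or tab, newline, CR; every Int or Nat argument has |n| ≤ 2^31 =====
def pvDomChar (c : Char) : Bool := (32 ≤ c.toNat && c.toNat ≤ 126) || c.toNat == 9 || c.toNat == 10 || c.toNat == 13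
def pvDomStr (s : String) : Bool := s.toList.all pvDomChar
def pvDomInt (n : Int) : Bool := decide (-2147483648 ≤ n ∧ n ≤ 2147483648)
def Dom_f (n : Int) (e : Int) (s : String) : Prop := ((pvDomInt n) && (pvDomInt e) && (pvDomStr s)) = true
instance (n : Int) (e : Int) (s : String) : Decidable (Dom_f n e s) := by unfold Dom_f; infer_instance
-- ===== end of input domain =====

-- B memoizes the recursion on the state (n, count('2')+count('3')-count('1')), replacing A's
-- string-building recursion tree by a dict-cached recursion that solves each state once.

-- ===== PORT A =====
-- literal transliteration of A, on the List Char side (strings proved via .toList);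
-- the '1 ≤ n' test only guards totality: where it fails Python's recursion never returns (excluded by Pre_f)
def fA (e : Int) (n : Int) (s : List Char) : Int :=
  if e < n then 0
  else if n = e then
    if PySem.Chars.count s ['1'] < PySem.Chars.count s ['2'] + PySem.Chars.count s ['3'] then 1 else 0
  else if 1 ≤ n then
    fA e (n + 3) (s ++ ['1']) + fA e (n * 2) (s ++ ['2']) + fA e (n * 7) (s ++ ['3'])
  else 0
termination_by (e - n).toNat
decreasing_by all_goals omega

def f (n : Int) (e : Int) (s : String) : Int := fA e n s.toList

-- ===== PORT B =====
-- memoized recursion of Source B: the memo dict is threaded through the three calls in Python's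
-- evaluation order; same totality guard '1 ≤ m' (Python diverges there, outside Pre_f)
def gB (e : Int) (memo : PySem.Dict (Int × Int) Int) (m : Int) (b : Int) :
    Int × PySem.Dict (Int × Int) Int :=
  if e < m then (0, memo)
  else if m = e then ((if 0 < b then 1 else 0), memo)
  else
    match memo.get? (m, b) with
    | some v => (v, memo)
    | none =>
      if 1 ≤ m then
        let p1 := gB e memo (m + 3) (b - 1)
        let p2 := gB e p1.2 (m * 2) (b + 1)
        let p3 := gB e p2.2 (m * 7) (b + 1)
        let r := p1.1 + p2.1 + p3.1
        (r, p3.2.insert (m, b) r)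
      else (0, memo)
termination_by (e - m).toNat
decreasing_by all_goals omega

def f_alt (n : Int) (e : Int) (s : String) : Int :=
  (gB e PySem.Dict.empty n
      ((PySem.Str.count s "2" : Int) + (PySem.Str.count s "3" : Int) - (PySem.Str.count s "1" : Int))).1

-- ===== PRECONDITION & SPEC =====
-- Pre_f excludes n ≤ 0 with n < e: there Python A recurses forever on n*2 ≤ n (RecursionError), returning nothing.
def Pre_f (n : Int) (e : Int) (s : String) : Prop := e < n ∨ n = e ∨ 1 ≤ n
instance (n : Int) (e : Int) (s : String) : Decidable (Pre_f n e s) := by unfold Pre_f; infer_instance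
def pvWitness_f : Int × Int × String := (1, 12, "12x")

def Spec_f (n : Int) (e : Int) (s : String) (out : Int) : Prop := out = f_alt n e s
instance (n : Int) (e : Int) (s : String) (out : Int) : Decidable (Spec_f n e s out) := by unfold Spec_f; infer_instance

-- ===== CLAIM (what is proved, stated in full; the proofs are below) =====
def Claim_equal_f : Prop := ∀ (n : Int) (e : Int) (s : String), Dom_f n e s → Pre_f n e s → Spec_f n e s (f n e s)

-- ===== LEMMAS AND PROOFS =====

-- the memo-free value of B's recursion, used only to relate the two ports
def P (e : Int) (n : Int) (b : Int) : Int :=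
  if e < n then 0
  else if n = e then (if 0 < b then 1 else 0)
  else if 1 ≤ n then P e (n + 3) (b - 1) + P e (n * 2) (b + 1) + P e (n * 7) (b + 1)
  else 0
termination_by (e - n).toNat
decreasing_by all_goals omega

theorem count_go_singleton (d : Char) : ∀ (cs : List Char) (acc : Nat),
    PySem.Chars.count.go [d] cs.length cs acc = acc + cs.count d := by
  intro cs
  induction cs with
  | nil => intro acc; simp [PySem.Chars.count.go]
  | cons h t ih =>
    intro acc
    show PySem.Chars.count.go [d] (t.length + 1) (h :: t) acc = _
    rw [PySem.Chars.count.go]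
    by_cases hd : d = h
    · subst hd
      simp [List.isPrefixOf, ih]
      omega
    · simp [List.isPrefixOf, hd, ih, Ne.symm hd]

theorem count_singleton (cs : List Char) (d : Char) :
    PySem.Chars.count cs [d] = cs.count d := by
  simpa [PySem.Chars.count] using count_go_singleton d cs 0

-- the state B tracks: count('2') + count('3') - count('1') of the string A carries
def bal (s : List Char) : Int :=
  (s.count '2' : Int) + (s.count '3' : Int) - (s.count '1' : Int)

theorem bal_append_one (s : List Char) : bal (s ++ ['1']) = bal s - 1 := by
  simp [bal, List.count_append]; ring
theorem bal_append_two (s : List Char) : bal (s ++ ['2']) = bal s + 1 := by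
  simp [bal, List.count_append]; ring
theorem bal_append_three (s : List Char) : bal (s ++ ['3']) = bal s + 1 := by
  simp [bal, List.count_append]; ring

theorem fA_eq_P (e : Int) (n : Int) (s : List Char) : fA e n s = P e n (bal s) := by
  fun_induction fA e n s
  case case1 n s h => rw [P, if_pos h]
  case case2 s h1 h2 =>
    rw [count_singleton, count_singleton, count_singleton] at h1
    rw [P, if_neg h2, if_pos rfl, if_pos (show (0:Int) < bal s by simp only [bal]; omega)]
  case case3 s h1 h2 =>
    rw [count_singleton, count_singleton, count_singleton] at h1
    rw [P, if_neg h2, if_pos rfl, if_neg (show ¬ (0:Int) < bal s by simp only [bal]; omega)]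
  case case4 n s h1 h2 h3 ih1 ih2 ih3 =>
    rw [P, if_neg h1, if_neg h2, if_pos h3]
    rw [ih1, ih2, ih3, bal_append_one, bal_append_two, bal_append_three]
  case case5 n s h1 h2 h3 => rw [P, if_neg h1, if_neg h2, if_neg h3]

def MemoInv (e : Int) (memo : PySem.Dict (Int × Int) Int) : Prop :=
  ∀ m b v, memo.get? (m, b) = some v → v = P e m b

theorem gB_correct (e : Int) : ∀ (k : Nat) (m b : Int) (memo : PySem.Dict (Int × Int) Int),
    (e - m).toNat ≤ k → MemoInv e memo →
    (gB e memo m b).1 = P e m b ∧ MemoInv e (gB e memo m b).2 := by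
  intro k
  induction k with
  | zero =>
    intro m b memo hk hinv
    rw [gB]
    by_cases h1 : e < m
    · simp only [if_pos h1]
      exact ⟨by rw [P, if_pos h1], hinv⟩
    · have h2 : m = e := by omega
      simp only [if_neg h1, if_pos h2]
      exact ⟨by rw [P, if_neg h1, if_pos h2], hinv⟩
  | succ k ih =>
    intro m b memo hk hinv
    rw [gB]
    by_cases h1 : e < m
    · simp only [if_pos h1]
      exact ⟨by rw [P, if_pos h1], hinv⟩
    · by_cases h2 : m = e
      · simp only [if_neg h1, if_pos h2]
        exact ⟨by rw [P, if_neg h1, if_pos h2], hinv⟩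
      · simp only [if_neg h1, if_neg h2]
        cases hget : memo.get? (m, b) with
        | some v => exact ⟨hinv m b v hget, hinv⟩
        | none =>
          by_cases h3 : 1 ≤ m
          · simp only [if_pos h3]
            obtain ⟨e1, i1⟩ := ih (m + 3) (b - 1) memo (by omega) hinv
            obtain ⟨e2, i2⟩ := ih (m * 2) (b + 1) _ (by omega) i1
            obtain ⟨e3, i3⟩ := ih (m * 7) (b + 1) _ (by omega) i2
            have hP : P e m b = P e (m + 3) (b - 1) + P e (m * 2) (b + 1) + P e (m * 7) (b + 1) := by
              conv_lhs => rw [P]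
              rw [if_neg h1, if_neg h2, if_pos h3]
            refine ⟨by rw [e1, e2, e3, hP], ?_⟩
            intro m' b' v hv
            rw [PySem.Dict.get?_insert] at hv
            by_cases hk' : (m', b') = (m, b)
            · rw [if_pos hk'] at hv
              injection hk' with ha hb
              subst ha; subst hb
              injection hv with hv'
              rw [← hv', e1, e2, e3, hP]
            · rw [if_neg hk'] at hv
              exact i3 m' b' v hv
          · simp only [if_neg h3]
            exact ⟨by rw [P, if_neg h1, if_neg h2, if_neg h3], hinv⟩

theorem toList_one : ("1" : String).toList = ['1'] := rfl
theorem toList_two : ("2" : String).toList = ['2'] := rfl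
theorem toList_three : ("3" : String).toList = ['3'] := rfl

-- ===== VERDICT (by name: the statement is the Claim_ definition above) =====
theorem f_spec : Claim_equal_f := by
  intro n e s _ _
  unfold Spec_f f f_alt
  rw [fA_eq_P]
  have h := gB_correct e (e - n).toNat n
      ((PySem.Str.count s "2" : Int) + (PySem.Str.count s "3" : Int) - (PySem.Str.count s "1" : Int))
      PySem.Dict.empty (le_refl _) (by intro m b v hv; simp [PySem.Dict.get?_empty] at hv)
  rw [h.1]
  simp [PySem.Str.count_eq, toList_one, toList_two, toList_three, count_singleton, bal]
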